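-- pv_equiv track=rewrite | github.com/flipstar77/youtube-summarizer-2 | video_highlight_extractor.py | _group_segments
-- ===== SOURCE A (Python) =====
-- from typing import List, Dict, Any, Tuple, Optional
--
-- def _group_segments(segments: List[Dict], min_duration: int, max_duration: int) -> List[List[Dict]]:
--     """Gruppiert SRT-Segmente zu zusammenhängenden Abschnitten"""
--     grouped = []
--     current_group = []
--
--     for segment in segments:
--         if not current_group:
--             current_group.append(segment)
--             continue
--
--         # Prüfe ob Segment zur aktuellen Gruppe passt
--         group_start = current_group[0]["start_seconds"]
--         group_end = current_group[-1]["end_seconds"]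
--         segment_start = segment["start_seconds"]
--
--         current_duration = group_end - group_start
--
--         # Füge hinzu wenn: Gap < 3 Sekunden und Gesamtdauer < max_duration
--         if (segment_start - group_end < 3 and
--             current_duration < max_duration):
--             current_group.append(segment)
--         else:
--             # Schließe aktuelle Gruppe ab wenn mindestens min_duration
--             if current_duration >= min_duration:
--                 grouped.append(current_group)
--             current_group = [segment]
--
--     # Letzte Gruppe hinzufügen
--     if current_group:
--         duration = current_group[-1]["end_seconds"] - current_group[0]["start_seconds"]
--         if duration >= min_duration:
--             grouped.append(current_group)
--
--     return grouped
-- ===== SOURCE B (Python) =====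
-- def _group_segments(segments, min_duration, max_duration):
--     """Front-consuming rewrite: repeatedly peel the maximal group off the front
--     of the remaining list, keeping each peeled group iff it is long enough."""
--     def take(group, rest):
--         # extend group with the longest fitting prefix of rest
--         i = 0
--         while i < len(rest):
--             seg = rest[i]
--             if (seg["start_seconds"] - group[-1]["end_seconds"] < 3
--                     and group[-1]["end_seconds"] - group[0]["start_seconds"] < max_duration):
--                 group.append(seg)
--                 i += 1
--             else:
--                 break
--         return group, rest[i:]
--
--     out = []
--     rest = segments
--     while rest:
--         group, rest = take([rest[0]], rest[1:])
--         if group[-1]["end_seconds"] - group[0]["start_seconds"] >= min_duration: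
--             out.append(group)
--     return out
-- ===== Notes on version B (the rewrite author's own statement) =====
-- stated objective: alternative
-- what changed: B replaces A's single fold carrying a (grouped, current_group) accumulator pair with a front-consuming decomposition: an inner routine peels the maximal fitting group off the front of the remaining list, and an outer loop repeatedly calls it and keeps each completed group iff its span reaches min_duration; there is no carried group state across groups and no end-of-loop flush.
import Mathlib
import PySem

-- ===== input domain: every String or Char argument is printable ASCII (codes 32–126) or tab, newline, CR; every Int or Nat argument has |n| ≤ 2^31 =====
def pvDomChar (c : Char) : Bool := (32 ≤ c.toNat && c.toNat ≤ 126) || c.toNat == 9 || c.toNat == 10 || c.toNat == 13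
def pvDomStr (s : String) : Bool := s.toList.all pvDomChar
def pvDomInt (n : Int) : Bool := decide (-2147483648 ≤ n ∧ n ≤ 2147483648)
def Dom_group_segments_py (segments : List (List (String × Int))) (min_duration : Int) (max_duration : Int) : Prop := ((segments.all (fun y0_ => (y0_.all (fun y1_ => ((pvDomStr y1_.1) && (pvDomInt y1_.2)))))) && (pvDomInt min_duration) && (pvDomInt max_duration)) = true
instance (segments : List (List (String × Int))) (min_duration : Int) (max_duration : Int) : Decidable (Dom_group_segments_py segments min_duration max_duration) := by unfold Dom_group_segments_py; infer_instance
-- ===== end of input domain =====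

-- B replaces A's accumulator fold by a front-consuming decomposition: peel the
-- maximal fitting group off the front, keep it iff long enough, recurse (objective: alternative).

-- seg[k] (KeyError excluded by Pre_; on dicts in Pre_ this is exactly Python's lookup)
def pvSegVal (d : List (String × Int)) (k : String) : Int := (d.lookup k).getD 0

-- ===== PORT A =====
def pvAStep (min_duration max_duration : Int)
    (st : List (List (List (String × Int))) × List (List (String × Int)))
    (segment : List (String × Int)) :
    List (List (List (String × Int))) × List (List (String × Int)) :=
  match st with
  | (grouped, current_group) =>
    if current_group = [] then (grouped, current_group ++ [segment])
    else
      let group_start := pvSegVal current_group.headI "start_seconds"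
      let group_end := pvSegVal current_group.getLast! "end_seconds"
      let segment_start := pvSegVal segment "start_seconds"
      let current_duration := group_end - group_start
      if segment_start - group_end < 3 ∧ current_duration < max_duration then
        (grouped, current_group ++ [segment])
      else
        ((if current_duration ≥ min_duration then grouped ++ [current_group] else grouped),
         [segment])

def group_segments_py (segments : List (List (String × Int))) (min_duration : Int) (max_duration : Int) : List (List (List (String × Int))) :=
  let st := segments.foldl (pvAStep min_duration max_duration) ([], [])
  match st with
  | (grouped, current_group) =>
    if current_group = [] then grouped
    else
      let duration := pvSegVal current_group.getLast! "end_seconds" -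
                      pvSegVal current_group.headI "start_seconds"
      if duration ≥ min_duration then grouped ++ [current_group] else grouped

-- ===== PORT B =====
-- Source B's inner `take`: extend `group` with the longest fitting prefix of `rest`
def pvTake (max_duration : Int) :
    List (List (String × Int)) → List (List (String × Int)) →
    List (List (String × Int)) × List (List (String × Int))
  | group, [] => (group, [])
  | group, seg :: rs =>
    if pvSegVal seg "start_seconds" - pvSegVal group.getLast! "end_seconds" < 3 ∧
       pvSegVal group.getLast! "end_seconds" - pvSegVal group.headI "start_seconds" < max_duration then
      pvTake max_duration (group ++ [seg]) rs
    else (group, seg :: rs)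

-- `take` never returns more remaining segments than it was given (for termination)
lemma pvTake_snd_length (max_duration : Int) :
    ∀ (rest group : List (List (String × Int))),
      (pvTake max_duration group rest).2.length ≤ rest.length := by
  intro rest
  induction rest with
  | nil => intro g; simp [pvTake]
  | cons seg rs ih =>
    intro g
    simp only [pvTake]
    split
    · exact le_trans (ih _) (Nat.le_succ _)
    · simp

-- Source B's outer while loop over the remaining list
def pvLoop (min_duration max_duration : Int) :
    List (List (String × Int)) → List (List (List (String × Int)))
  | [] => []
  | s :: rest =>
    let t := pvTake max_duration [s] rest
    (if pvSegVal t.1.getLast! "end_seconds" - pvSegVal t.1.headI "start_seconds" ≥ min_duration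
     then [t.1] else []) ++ pvLoop min_duration max_duration t.2
termination_by l => l.length
decreasing_by exact Nat.lt_succ_of_le (pvTake_snd_length _ _ _)

def group_segments_py_alt (segments : List (List (String × Int))) (min_duration : Int) (max_duration : Int) : List (List (List (String × Int))) :=
  pvLoop min_duration max_duration segments

-- ===== PRECONDITION & SPEC =====
-- Pre_ excludes exactly the segments missing a "start_seconds" or "end_seconds" key,
-- on which the Python raises KeyError.
def Pre_group_segments_py (segments : List (List (String × Int))) (min_duration : Int) (max_duration : Int) : Prop :=
  ∀ seg ∈ segments, (seg.lookup "start_seconds").isSome = true ∧ (seg.lookup "end_seconds").isSome = true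
instance (segments : List (List (String × Int))) (min_duration : Int) (max_duration : Int) : Decidable (Pre_group_segments_py segments min_duration max_duration) := by unfold Pre_group_segments_py; infer_instance

def pvWitness_group_segments_py : (List (List (String × Int))) × Int × Int :=
  ([[("start_seconds", 0), ("end_seconds", 5)], [("start_seconds", 6), ("end_seconds", 9)]], 1, 10)

def Spec_group_segments_py (segments : List (List (String × Int))) (min_duration : Int) (max_duration : Int) (out : List (List (List (String × Int)))) : Prop := out = group_segments_py_alt segments min_duration max_duration
instance (segments : List (List (String × Int))) (min_duration : Int) (max_duration : Int) (out : List (List (List (String × Int)))) : Decidable (Spec_group_segments_py segments min_duration max_duration out) := by unfold Spec_group_segments_py; infer_instance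

-- ===== CLAIM (what is proved, stated in full; the proofs are below) =====
def Claim_equal_group_segments_py : Prop := ∀ (segments : List (List (String × Int))) (min_duration : Int) (max_duration : Int), Dom_group_segments_py segments min_duration max_duration → Pre_group_segments_py segments min_duration max_duration → Spec_group_segments_py segments min_duration max_duration (group_segments_py segments min_duration max_duration)

-- ===== LEMMAS AND PROOFS =====

-- A's trailing flush as a function of the fold's final state
def pvAFinish (min_duration : Int)
    (st : List (List (List (String × Int))) × List (List (String × Int))) :
    List (List (List (String × Int))) :=
  if st.2 = [] then st.1
  else if pvSegVal st.2.getLast! "end_seconds" - pvSegVal st.2.headI "start_seconds" ≥ min_duration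
       then st.1 ++ [st.2] else st.1

lemma pvAFinish_eq (segments : List (List (String × Int))) (min_duration max_duration : Int) :
    group_segments_py segments min_duration max_duration =
      pvAFinish min_duration (segments.foldl (pvAStep min_duration max_duration) ([], [])) := by
  unfold group_segments_py pvAFinish
  rcases segments.foldl (pvAStep min_duration max_duration) ([], []) with ⟨g, c⟩
  rfl

-- what B produces from a nonempty in-progress group `cur` and remaining list `rest`
def pvFrom (min_duration max_duration : Int)
    (cur rest : List (List (String × Int))) : List (List (List (String × Int))) :=
  let t := pvTake max_duration cur rest
  (if pvSegVal t.1.getLast! "end_seconds" - pvSegVal t.1.headI "start_seconds" ≥ min_duration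
   then [t.1] else []) ++ pvLoop min_duration max_duration t.2

lemma pvLoop_cons (min_duration max_duration : Int) (s : List (String × Int))
    (rest : List (List (String × Int))) :
    pvLoop min_duration max_duration (s :: rest) = pvFrom min_duration max_duration [s] rest := by
  rw [pvLoop, pvFrom]

-- main invariant: A's fold-then-flush from state (grouped, cur), cur ≠ [],
-- equals grouped ++ B's production from (cur, rest)
lemma pv_main (min_duration max_duration : Int) :
    ∀ (rest : List (List (String × Int))) (grouped : List (List (List (String × Int))))
      (cur : List (List (String × Int))), cur ≠ [] →
      pvAFinish min_duration (rest.foldl (pvAStep min_duration max_duration) (grouped, cur)) =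
        grouped ++ pvFrom min_duration max_duration cur rest := by
  intro rest
  induction rest with
  | nil =>
    intro grouped cur hc
    simp only [List.foldl_nil, pvAFinish, pvFrom, pvTake, pvLoop]
    rw [if_neg hc]
    split <;> simp
  | cons seg rs ih =>
    intro grouped cur hc
    simp only [List.foldl_cons]
    by_cases hfit :
        pvSegVal seg "start_seconds" - pvSegVal cur.getLast! "end_seconds" < 3 ∧
        pvSegVal cur.getLast! "end_seconds" - pvSegVal cur.headI "start_seconds" < max_duration
    · have hA : pvAStep min_duration max_duration (grouped, cur) seg = (grouped, cur ++ [seg]) := by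
        simp only [pvAStep]
        rw [if_neg hc, if_pos hfit]
      have hT : pvFrom min_duration max_duration cur (seg :: rs) =
          pvFrom min_duration max_duration (cur ++ [seg]) rs := by
        unfold pvFrom
        rw [pvTake, if_pos hfit]
      rw [hA, hT]
      exact ih grouped (cur ++ [seg]) (by simp)
    · have hA : pvAStep min_duration max_duration (grouped, cur) seg =
          ((if pvSegVal cur.getLast! "end_seconds" - pvSegVal cur.headI "start_seconds" ≥ min_duration
            then grouped ++ [cur] else grouped), [seg]) := by
        simp only [pvAStep]
        rw [if_neg hc, if_neg hfit]
      have hT : pvFrom min_duration max_duration cur (seg :: rs) =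
          (if pvSegVal cur.getLast! "end_seconds" - pvSegVal cur.headI "start_seconds" ≥ min_duration
           then [cur] else []) ++ pvFrom min_duration max_duration [seg] rs := by
        unfold pvFrom
        rw [pvTake, if_neg hfit]
        simp only [pvLoop_cons, pvFrom]
      rw [hA, hT]
      rw [ih _ [seg] (by simp)]
      split <;> simp

-- ===== VERDICT (by name: the statement is the Claim_ definition above) =====
theorem group_segments_py_spec : Claim_equal_group_segments_py := by
  intro segments min_duration max_duration _ _
  unfold Spec_group_segments_py group_segments_py_alt
  rw [pvAFinish_eq]
  cases segments with
  | nil => simp [pvAFinish, pvLoop]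
  | cons s rest =>
    simp only [List.foldl_cons]
    have hA : pvAStep min_duration max_duration ([], []) s = ([], [s]) := by
      simp [pvAStep]
    rw [hA, pv_main min_duration max_duration rest [] [s] (by simp), pvLoop_cons]
    simp
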